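-- pv_equiv track=rewrite | github.com/niallc/Snowflake2025 | hex_ai/utils/weaks_cells.py | _has_three_plus_one_opposite
-- ===== SOURCE A (Python) =====
-- from typing import List, Tuple, Set
--
-- def _opp(color: str) -> str:
--     return "b" if color == "r" else "r"
--
-- def _has_three_plus_one_opposite(ring: List[str], color: str) -> bool:
--     """Exists ... color,color,color ... with an adjacent opposite on either end."""
--     opp = _opp(color)
--     for i in range(6):
--         if (
--             ring[i] == color
--             and ring[(i + 1) % 6] == color
--             and ring[(i + 2) % 6] == color
--             and (
--                 ring[(i - 1) % 6] == opp or ring[(i + 3) % 6] == opp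
--             )
--         ):
--             return True
--     return False
-- ===== SOURCE B (Python) =====
-- def _has_three_plus_one_opposite(ring, color):
--     """Exists ... color,color,color ... with an adjacent opposite on either end."""
--     opp = "b" if color == "r" else "r"
--     s = "".join("C" if ring[i] == color else ("O" if ring[i] == opp else ".")
--                 for i in range(6))
--     d = s + s
--     return "OCCC" in d or "CCCO" in d
-- ===== Notes on version B (the rewrite author's own statement) =====
-- stated objective: idiomatic
-- what changed: Replaces the modular-index window scan with a one-char-per-cell encoding of the six ring cells ('C'=color, 'O'=opposite, '.'=other) and a substring search for the two length-4 patterns OCCC / CCCO in the doubled string, which covers the cyclic wrap.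
-- outside the precondition, e.g. on _has_three_plus_one_opposite(['b', 'r', 'r', 'r', 'r'], 'r'): A returns True, B raises IndexError
import Mathlib
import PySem

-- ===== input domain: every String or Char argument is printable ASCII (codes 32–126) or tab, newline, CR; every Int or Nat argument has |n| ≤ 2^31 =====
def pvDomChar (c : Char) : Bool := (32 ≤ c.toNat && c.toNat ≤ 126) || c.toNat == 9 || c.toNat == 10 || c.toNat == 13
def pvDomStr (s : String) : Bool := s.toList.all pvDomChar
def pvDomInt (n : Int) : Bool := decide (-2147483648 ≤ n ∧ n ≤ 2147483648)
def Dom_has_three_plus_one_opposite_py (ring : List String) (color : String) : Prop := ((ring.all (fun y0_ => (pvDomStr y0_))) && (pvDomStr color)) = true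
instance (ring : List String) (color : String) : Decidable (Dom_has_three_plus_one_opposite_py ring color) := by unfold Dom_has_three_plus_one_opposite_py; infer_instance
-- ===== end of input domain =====

-- B replaces A's modular-index window scan by a one-char-per-cell encoding plus a substring
-- search in the doubled string (idiomatic; same cost; return-value equivalence only).

-- 'pat in s' (Python substring membership) ported as contiguous-sublist containment
def pvInfix (p l : List Char) : Bool := decide (p <:+: l)

-- ===== PORT A =====
-- literal transliteration of A: for i in range(6), indices taken mod 6 via PySem.Int.mod,
-- ring[j] ported as pyGet? (none = IndexError, excluded by Pre_)
def has_three_plus_one_opposite_py (ring : List String) (color : String) : Bool :=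
  let opp := if color == "r" then "b" else "r"
  (PySem.List.pyRange 0 6 1).any fun i =>
    (PySem.List.pyGet? ring i == some color)
    && (PySem.List.pyGet? ring (PySem.Int.mod (i + 1) 6) == some color)
    && (PySem.List.pyGet? ring (PySem.Int.mod (i + 2) 6) == some color)
    && ((PySem.List.pyGet? ring (PySem.Int.mod (i - 1) 6) == some opp)
        || (PySem.List.pyGet? ring (PySem.Int.mod (i + 3) 6) == some opp))

-- ===== PORT B =====
-- literal transliteration of Source B: encode ring[i] for i in range(6) one char per cell
-- (ring[i] via pyGet?; the none branch is a totality guard for the IndexError Pre_ excludes),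
-- double the encoding, substring search
def has_three_plus_one_opposite_py_alt (ring : List String) (color : String) : Bool :=
  let opp := if color == "r" then "b" else "r"
  let s := (PySem.List.pyRange 0 6 1).map fun i =>
    match PySem.List.pyGet? ring i with
    | some cell => if cell == color then 'C' else if cell == opp then 'O' else '.'
    | none => '?'
  let d := s ++ s
  pvInfix ['O','C','C','C'] d || pvInfix ['C','C','C','O'] d

-- ===== PRECONDITION & SPEC =====
-- Pre_ excludes rings with fewer than 6 cells: there A raises IndexError unless its
-- short-circuit scan happens to return True before touching an out-of-range index (an
-- accident of evaluation order on malformed input); B always encodes all six cells and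
-- raises IndexError on every such ring, surfacing the caller bug.
def Pre_has_three_plus_one_opposite_py (ring : List String) (color : String) : Prop :=
  6 ≤ ring.length
instance (ring : List String) (color : String) : Decidable (Pre_has_three_plus_one_opposite_py ring color) := by unfold Pre_has_three_plus_one_opposite_py; infer_instance

def pvWitness_has_three_plus_one_opposite_py : List String × String :=
  (["r", "r", "r", "b", "x", "y"], "r")

def Spec_has_three_plus_one_opposite_py (ring : List String) (color : String) (out : Bool) : Prop := out = has_three_plus_one_opposite_py_alt ring color
instance (ring : List String) (color : String) (out : Bool) : Decidable (Spec_has_three_plus_one_opposite_py ring color out) := by unfold Spec_has_three_plus_one_opposite_py; infer_instance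

-- ===== CLAIM (what is proved, stated in full; the proofs are below) =====
def Claim_equal_has_three_plus_one_opposite_py : Prop := ∀ (ring : List String) (color : String), Dom_has_three_plus_one_opposite_py ring color → Pre_has_three_plus_one_opposite_py ring color → Spec_has_three_plus_one_opposite_py ring color (has_three_plus_one_opposite_py ring color)

-- ===== LEMMAS AND PROOFS =====

-- the mark of a cell depends only on the two booleans (cell == color) and (cell == opp)
def pvMark (c o : Bool) : Char := if c then 'C' else if o then 'O' else '.'

-- the core fact, over the 12 booleans of the six cells (with color ≠ opp: a cell cannot
-- match both): A's window scan equals B's substring search on the doubled encoding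
theorem pv_key : ∀ (c0 o0 c1 o1 c2 o2 c3 o3 c4 o4 c5 o5 : Bool),
    (c0 && o0) = false → (c1 && o1) = false → (c2 && o2) = false →
    (c3 && o3) = false → (c4 && o4) = false → (c5 && o5) = false →
    ((c0 && c1 && c2 && (o5 || o3)) || (c1 && c2 && c3 && (o0 || o4)) ||
     (c2 && c3 && c4 && (o1 || o5)) || (c3 && c4 && c5 && (o2 || o0)) ||
     (c4 && c5 && c0 && (o3 || o1)) || (c5 && c0 && c1 && (o4 || o2)))
    = (let s := [pvMark c0 o0, pvMark c1 o1, pvMark c2 o2, pvMark c3 o3, pvMark c4 o4, pvMark c5 o5]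
       let d := s ++ s
       pvInfix ['O','C','C','C'] d || pvInfix ['C','C','C','O'] d) := by
  decide

theorem pv_ne_opp (color : String) :
    ¬ (color = (if color == "r" then "b" else "r")) := by
  by_cases h : color == "r"
  · rw [beq_iff_eq] at h
    subst h
    simp
  · simp only [h, Bool.false_eq_true, if_false]
    intro hc
    rw [hc] at h
    simp at h

theorem pv_no_both (cell color : String) :
    ((cell == color) && (cell == (if color == "r" then "b" else "r"))) = false := by
  by_cases h1 : cell == color
  · by_cases h2 : cell == (if color == "r" then "b" else "r")
    · exfalso
      rw [beq_iff_eq] at h1 h2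
      exact pv_ne_opp color (h1 ▸ h2)
    · rw [Bool.and_eq_false_iff]
      right
      simpa using h2
  · rw [Bool.and_eq_false_iff]
    left
    simpa using h1

-- the first six indices of a ≥6-element list, as pyGet? facts
theorem pvG (a b c d e f : String) (rest : List String) :
    PySem.List.pyGet? (a::b::c::d::e::f::rest) 0 = some a ∧
    PySem.List.pyGet? (a::b::c::d::e::f::rest) 1 = some b ∧
    PySem.List.pyGet? (a::b::c::d::e::f::rest) 2 = some c ∧
    PySem.List.pyGet? (a::b::c::d::e::f::rest) 3 = some d ∧
    PySem.List.pyGet? (a::b::c::d::e::f::rest) 4 = some e ∧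
    PySem.List.pyGet? (a::b::c::d::e::f::rest) 5 = some f := by
  refine ⟨?_, ?_, ?_, ?_, ?_, ?_⟩ <;>
    · first
      | simpa using PySem.List.pyGet?_ofNat (xs := a::b::c::d::e::f::rest) (n := 0) (by simp)
      | simpa using PySem.List.pyGet?_ofNat (xs := a::b::c::d::e::f::rest) (n := 1) (by simp)
      | simpa using PySem.List.pyGet?_ofNat (xs := a::b::c::d::e::f::rest) (n := 2) (by simp)
      | simpa using PySem.List.pyGet?_ofNat (xs := a::b::c::d::e::f::rest) (n := 3) (by simp)
      | simpa using PySem.List.pyGet?_ofNat (xs := a::b::c::d::e::f::rest) (n := 4) (by simp)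
      | simpa using PySem.List.pyGet?_ofNat (xs := a::b::c::d::e::f::rest) (n := 5) (by simp)

-- ===== VERDICT (by name: the statement is the Claim_ definition above) =====
theorem has_three_plus_one_opposite_py_spec : Claim_equal_has_three_plus_one_opposite_py := by
  intro ring color _hdom hpre
  unfold Pre_has_three_plus_one_opposite_py at hpre
  unfold Spec_has_three_plus_one_opposite_py
  obtain ⟨a, b, c, d, e, f, rest, rfl⟩ :
      ∃ a b c d e f rest, ring = a :: b :: c :: d :: e :: f :: rest := by
    match ring, hpre with
    | a :: b :: c :: d :: e :: f :: rest, _ => exact ⟨a, b, c, d, e, f, rest, rfl⟩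
  obtain ⟨g0, g1, g2, g3, g4, g5⟩ := pvG a b c d e f rest
  have hA : has_three_plus_one_opposite_py (a :: b :: c :: d :: e :: f :: rest) color =
      (let opp := if color == "r" then "b" else "r"
       ((a == color) && (b == color) && (c == color) && ((f == opp) || (d == opp))) ||
       ((b == color) && (c == color) && (d == color) && ((a == opp) || (e == opp))) ||
       ((c == color) && (d == color) && (e == color) && ((b == opp) || (f == opp))) ||
       ((d == color) && (e == color) && (f == color) && ((c == opp) || (a == opp))) ||
       ((e == color) && (f == color) && (a == color) && ((d == opp) || (b == opp))) ||
       ((f == color) && (a == color) && (b == color) && ((e == opp) || (c == opp)))) := by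
    simp only [has_three_plus_one_opposite_py,
      show PySem.List.pyRange 0 6 1 = [0,1,2,3,4,5] from by decide,
      List.any_cons, List.any_nil,
      show PySem.Int.mod (0+1) 6 = 1 from by decide,
      show PySem.Int.mod (0+2) 6 = 2 from by decide,
      show PySem.Int.mod (0-1) 6 = 5 from by decide,
      show PySem.Int.mod (0+3) 6 = 3 from by decide,
      show PySem.Int.mod (1+1) 6 = 2 from by decide,
      show PySem.Int.mod (1+2) 6 = 3 from by decide,
      show PySem.Int.mod (1-1) 6 = 0 from by decide,
      show PySem.Int.mod (1+3) 6 = 4 from by decide,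
      show PySem.Int.mod (2+1) 6 = 3 from by decide,
      show PySem.Int.mod (2+2) 6 = 4 from by decide,
      show PySem.Int.mod (2-1) 6 = 1 from by decide,
      show PySem.Int.mod (2+3) 6 = 5 from by decide,
      show PySem.Int.mod (3+1) 6 = 4 from by decide,
      show PySem.Int.mod (3+2) 6 = 5 from by decide,
      show PySem.Int.mod (3-1) 6 = 2 from by decide,
      show PySem.Int.mod (3+3) 6 = 0 from by decide,
      show PySem.Int.mod (4+1) 6 = 5 from by decide,
      show PySem.Int.mod (4+2) 6 = 0 from by decide,
      show PySem.Int.mod (4-1) 6 = 3 from by decide,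
      show PySem.Int.mod (4+3) 6 = 1 from by decide,
      show PySem.Int.mod (5+1) 6 = 0 from by decide,
      show PySem.Int.mod (5+2) 6 = 1 from by decide,
      show PySem.Int.mod (5-1) 6 = 4 from by decide,
      show PySem.Int.mod (5+3) 6 = 2 from by decide,
      g0, g1, g2, g3, g4, g5]
    cases hc : color == "r" <;>
      simp [Bool.or_assoc]
  have hB : has_three_plus_one_opposite_py_alt (a :: b :: c :: d :: e :: f :: rest) color =
      (let opp := if color == "r" then "b" else "r"
       let s := [pvMark (a == color) (a == opp), pvMark (b == color) (b == opp),
                 pvMark (c == color) (c == opp), pvMark (d == color) (d == opp),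
                 pvMark (e == color) (e == opp), pvMark (f == color) (f == opp)]
       let d' := s ++ s
       pvInfix ['O','C','C','C'] d' || pvInfix ['C','C','C','O'] d') := by
    simp only [has_three_plus_one_opposite_py_alt,
      show PySem.List.pyRange 0 6 1 = [0,1,2,3,4,5] from by decide,
      List.map_cons, List.map_nil, g0, g1, g2, g3, g4, g5, pvMark]
  rw [hA, hB]
  simp only []
  rw [← pv_key (a == color) (a == (if color == "r" then "b" else "r"))
      (b == color) (b == (if color == "r" then "b" else "r"))
      (c == color) (c == (if color == "r" then "b" else "r"))
      (d == color) (d == (if color == "r" then "b" else "r"))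
      (e == color) (e == (if color == "r" then "b" else "r"))
      (f == color) (f == (if color == "r" then "b" else "r"))
      (pv_no_both a color) (pv_no_both b color) (pv_no_both c color)
      (pv_no_both d color) (pv_no_both e color) (pv_no_both f color)]
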